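-- pv_equiv track=rewrite | github.com/YHordijk/yutility | dictfunc.py | remove_false_keys
-- ===== SOURCE A (Python) =====
-- def remove_false_keys(dic):
--     to_remove = []
--     for key, value in dic.items():
--         if not value:
--             to_remove.append(key)
--     for key in to_remove:
--         del(dic[key])
--     return dic
-- ===== SOURCE B (Python) =====
-- def remove_false_keys(dic):
--     keep = {k: v for k, v in dic.items() if v}
--     dic.clear()
--     dic.update(keep)
--     return dic
-- ===== Notes on version B (the rewrite author's own statement) =====
-- stated objective: simpler
-- what changed: Instead of collecting the falsy keys in one pass and deleting them one by one in a second pass, B builds the truthy entries in a single comprehension and rewrites the dict in place with clear()+update(); Pre_ excludes association lists with duplicate keys, which do not represent a Python dict.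
import Mathlib
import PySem

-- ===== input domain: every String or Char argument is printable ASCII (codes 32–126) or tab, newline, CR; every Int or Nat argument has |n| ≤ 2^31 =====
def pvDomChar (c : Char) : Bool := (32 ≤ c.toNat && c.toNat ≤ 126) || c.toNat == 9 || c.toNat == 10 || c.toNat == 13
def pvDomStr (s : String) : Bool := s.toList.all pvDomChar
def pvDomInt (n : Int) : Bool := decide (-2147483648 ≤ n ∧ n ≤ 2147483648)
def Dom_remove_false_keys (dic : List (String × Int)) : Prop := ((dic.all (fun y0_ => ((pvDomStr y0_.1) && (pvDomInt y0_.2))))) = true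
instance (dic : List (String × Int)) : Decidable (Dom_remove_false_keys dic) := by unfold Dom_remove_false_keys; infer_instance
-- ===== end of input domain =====

-- B rewrites the dict in place from a single comprehension of the truthy entries (clear+update)
-- instead of A's two passes (collect falsy keys, then delete each); equivalence is about the
-- return value; both mutate the argument dict in place to the same final contents.


-- ===== PORT A =====
-- first pass: to_remove = keys whose value is falsy (int: == 0)
-- second pass: del dic[key] for each collected key (PySem.Dict.erase)
def remove_false_keys (dic : List (String × Int)) : List (String × Int) :=
  let to_remove : List String :=
    dic.foldl (fun acc kv => if kv.2 == 0 then acc ++ [kv.1] else acc) []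
  (to_remove.foldl (fun d k => PySem.Dict.erase d k) (PySem.Dict.mk dic)).items

-- ===== PORT B =====
-- keep = {k: v for k, v in dic.items() if v}; dic.clear(); dic.update(keep); return dic
def remove_false_keys_alt (dic : List (String × Int)) : List (String × Int) :=
  let keep := dic.filter (fun kv => kv.2 != 0)
  keep

-- ===== PRECONDITION & SPEC =====
-- Pre_ excludes association lists with duplicate keys: those do not represent any Python dict
-- (dict.items() never yields a repeated key), so neither behaviour there is the function's.
def Pre_remove_false_keys (dic : List (String × Int)) : Prop :=
  (dic.map Prod.fst).Nodup
instance (dic : List (String × Int)) : Decidable (Pre_remove_false_keys dic) := by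
  unfold Pre_remove_false_keys; infer_instance
def pvWitness_remove_false_keys : (List (String × Int)) := [("a", 1), ("b", 0), ("c", -2)]
def Spec_remove_false_keys (dic : List (String × Int)) (out : List (String × Int)) : Prop := out = remove_false_keys_alt dic
instance (dic : List (String × Int)) (out : List (String × Int)) : Decidable (Spec_remove_false_keys dic out) := by unfold Spec_remove_false_keys; infer_instance

-- ===== CLAIM (what is proved, stated in full; the proofs are below) =====
def Claim_equal_remove_false_keys : Prop := ∀ (dic : List (String × Int)), Dom_remove_false_keys dic → Pre_remove_false_keys dic → Spec_remove_false_keys dic (remove_false_keys dic)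

-- ===== LEMMAS AND PROOFS =====

-- membership in A's collected key list
lemma mem_to_remove (dic : List (String × Int)) (k : String) :
    k ∈ dic.foldl (fun acc kv => if kv.2 == 0 then acc ++ [kv.1] else acc) [] ↔
      ∃ kv ∈ dic, kv.2 = 0 ∧ kv.1 = k := by
  rw [PySem.List.foldl_append_if]
  simp only [List.nil_append, List.mem_map, List.mem_filter, beq_iff_eq]
  constructor
  · rintro ⟨kv, ⟨h1, h2⟩, h3⟩; exact ⟨kv, h1, h2, h3⟩
  · rintro ⟨kv, h1, h2, h3⟩; exact ⟨kv, ⟨h1, h2⟩, h3⟩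

-- folding Dict.erase over a key list filters out exactly those keys
lemma foldl_erase_eq_filter (ks : List String) (l : List (String × Int)) :
    (ks.foldl (fun d k => PySem.Dict.erase d k) (PySem.Dict.mk l)).items =
      l.filter (fun p => decide (p.1 ∉ ks)) := by
  induction ks generalizing l with
  | nil => simp
  | cons k ks ih =>
      rw [List.foldl_cons]
      have h : PySem.Dict.erase (PySem.Dict.mk l) k
          = PySem.Dict.mk (l.filter (fun p => !(p.1 == k))) := rfl
      rw [h, ih, List.filter_filter]
      apply List.filter_congr
      intro p _
      by_cases hpk : p.1 = k <;> simp [hpk]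

theorem remove_false_keys_spec_aux (dic : List (String × Int))
    (hpre : Pre_remove_false_keys dic) :
    remove_false_keys dic = remove_false_keys_alt dic := by
  unfold remove_false_keys remove_false_keys_alt
  rw [foldl_erase_eq_filter]
  set TR := dic.foldl (fun acc kv => if kv.2 == 0 then acc ++ [kv.1] else acc) [] with hTR
  apply List.filter_congr
  intro p hp
  by_cases h0 : p.2 = 0
  · have hm : p.1 ∈ TR := (mem_to_remove dic p.1).mpr ⟨p, hp, h0, rfl⟩
    simp [hm, h0]
  · have hm : p.1 ∉ TR := by
      intro hmem
      obtain ⟨kv, hkv, hkv0, hkvk⟩ := (mem_to_remove dic p.1).mp hmem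
      -- duplicate-free keys: kv and p share a key, hence are the same entry
      have hkvp : kv = p := List.inj_on_of_nodup_map hpre hkv hp hkvk
      exact h0 (hkvp ▸ hkv0)
    simp [hm, h0]

-- ===== VERDICT (by name: the statement is the Claim_ definition above) =====
theorem remove_false_keys_spec : Claim_equal_remove_false_keys := by
  intro dic _ hpre
  exact remove_false_keys_spec_aux dic hpre
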